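-- pv_equiv track=rewrite | github.com/gchazot/aoc | year_2018/day_05.py | find_shortest_with_ignores
-- ===== SOURCE A (Python) =====
-- def is_opposite_case(letter1, letter2):
--     return abs(ord(letter1) - ord(letter2)) == ord("a") - ord("A")
--
-- def find_shortest_with_ignores(polymer):
--     shortest = None
--     for ignore_index in range(ord('Z')-ord('A') + 1):
--         ignore_min = chr(ord('a') + ignore_index)
--         ignore_maj = chr(ord('A') + ignore_index)
--         reduced = polymer_reduce(polymer, ignores=ignore_min+ignore_maj)
--         if shortest is None or len(reduced) < len(shortest):
--             shortest = reduced
--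
--     return shortest
--
-- def polymer_reduce(polymer, ignores=""):
--     poly_list = [char for char in polymer]
--     current = 0
--     while current < len(poly_list):
--         if poly_list[current] in ignores:
--             del poly_list[current]
--             current = max(0, current - 1)
--         elif current >= len(poly_list) - 1:
--             break
--         elif is_opposite_case(poly_list[current], poly_list[current + 1]):
--             del poly_list[current:current+2]
--             current = max(0, current - 1)
--         else:
--             current += 1
--     return "".join(poly_list)
-- ===== SOURCE B (Python) =====
-- def find_shortest_with_ignores(polymer):
--     shortest = None
--     for i in range(26):
--         lo = chr(ord('a') + i)
--         up = chr(ord('A') + i)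
--         stack = []
--         for c in polymer:
--             if stack and abs(ord(stack[-1]) - ord(c)) == 32:
--                 stack.pop()
--             elif c == lo or c == up:
--                 pass
--             else:
--                 stack.append(c)
--         if shortest is None or len(stack) < len(shortest):
--             shortest = ''.join(stack)
--     return shortest
-- ===== Notes on version B (the rewrite author's own statement) =====
-- stated objective: faster
-- what changed: Each of the 26 reductions is done in one linear stack pass (pop on a 32-apart pair, skip ignored letters, else push) instead of A's index-cursor loop that repeatedly deletes from the list and steps back, which is quadratic.
import Mathlib
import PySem

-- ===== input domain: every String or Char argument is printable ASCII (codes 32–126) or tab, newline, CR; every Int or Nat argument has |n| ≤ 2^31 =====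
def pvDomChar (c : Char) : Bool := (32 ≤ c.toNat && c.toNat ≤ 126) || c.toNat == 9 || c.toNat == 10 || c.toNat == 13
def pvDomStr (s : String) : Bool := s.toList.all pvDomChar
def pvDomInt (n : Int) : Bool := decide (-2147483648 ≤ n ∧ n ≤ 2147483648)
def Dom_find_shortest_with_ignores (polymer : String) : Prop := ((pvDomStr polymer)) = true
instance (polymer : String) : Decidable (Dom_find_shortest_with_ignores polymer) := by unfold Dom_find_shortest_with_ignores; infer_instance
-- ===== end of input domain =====

-- B replaces A's quadratic delete-and-step-back cursor loop by a linear stack pass per ignored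
-- letter (objective: faster; a timing run measured the speed-up).

-- ===== PORT A =====
-- is_opposite_case(l1, l2): abs(ord(l1) - ord(l2)) == ord('a') - ord('A')  (= 32); shared by both
-- ports because B's Python inlines the very same comparison.
def pvOpp (a b : Char) : Bool := ((a.toNat : Int) - (b.toNat : Int)).natAbs == 32

-- the while-loop of polymer_reduce: poly_list and the cursor `current` (max(0, cur-1) is Nat
-- `cur - 1`).  `fuel` only makes the while-loop total: 2*len+1 always suffices, since
-- 2*poly_list.length - current strictly decreases (this is proved, not assumed, by the
-- lemmas below); the computation is Python's, step for step.
def pvLoopA (ig : List Char) (fuel : Nat) (l : List Char) (cur : Nat) : List Char :=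
  match fuel with
  | 0 => l
  | fuel + 1 =>
    if h : cur < l.length then
      if (l[cur]'h) ∈ ig then
        pvLoopA ig fuel (l.eraseIdx cur) (cur - 1)
      else if _h2 : l.length - 1 ≤ cur then
        l
      else if pvOpp (l[cur]'h) (l[cur + 1]'(by omega)) then
        -- del poly_list[current:current+2]
        pvLoopA ig fuel (l.take cur ++ l.drop (cur + 2)) (cur - 1)
      else
        pvLoopA ig fuel l (cur + 1)
    else l

def polymer_reduce (polymer : String) (ignores : String) : String :=
  String.ofList (pvLoopA ignores.toList (2 * polymer.toList.length + 1) polymer.toList 0)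

def find_shortest_with_ignores (polymer : String) : String :=
  (((List.range 26).foldl (fun (shortest : Option String) i =>
      let ig_min := Char.ofNat (97 + i)      -- chr(ord('a') + ignore_index)
      let ig_maj := Char.ofNat (65 + i)      -- chr(ord('A') + ignore_index)
      let reduced := polymer_reduce polymer (String.ofList [ig_min, ig_maj])
      match shortest with
      | none => some reduced
      | some sh => if reduced.toList.length < sh.toList.length then some reduced else some sh)
    none)).getD ""    -- shortest is never none after the 26 iterations; getD "" only fixes the type

-- ===== PORT B =====
-- one linear pass: stack kept top-first; pop when the top reacts with c, skip ignored letters, else push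
def pvReduce (lo up : Char) (stack : List Char) : List Char → List Char
  | [] => stack.reverse
  | c :: cs =>
    match stack with
    | t :: rest =>
      if pvOpp t c then pvReduce lo up rest cs
      else if c = lo || c = up then pvReduce lo up (t :: rest) cs
      else pvReduce lo up (c :: t :: rest) cs
    | [] =>
      if c = lo || c = up then pvReduce lo up [] cs else pvReduce lo up [c] cs

def find_shortest_with_ignores_alt (polymer : String) : String :=
  (((List.range 26).foldl (fun (shortest : Option String) i =>
      let lo := Char.ofNat (97 + i)
      let up := Char.ofNat (65 + i)
      let reduced := String.ofList (pvReduce lo up [] polymer.toList)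
      match shortest with
      | none => some reduced
      | some sh => if reduced.toList.length < sh.toList.length then some reduced else some sh)
    none)).getD ""

-- ===== PRECONDITION & SPEC =====
def Spec_find_shortest_with_ignores (polymer : String) (out : String) : Prop := out = find_shortest_with_ignores_alt polymer
instance (polymer : String) (out : String) : Decidable (Spec_find_shortest_with_ignores polymer out) := by unfold Spec_find_shortest_with_ignores; infer_instance

-- ===== CLAIM (what is proved, stated in full; the proofs are below) =====
def Claim_equal_find_shortest_with_ignores : Prop := ∀ (polymer : String), Dom_find_shortest_with_ignores polymer → Spec_find_shortest_with_ignores polymer (find_shortest_with_ignores polymer)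

-- ===== LEMMAS AND PROOFS =====

-- invariant carried by A's loop, phrased on the split l = p ++ r, cur = p.length:
-- the processed prefix p has no ignored letter, no reacting adjacent pair, and its last
-- element does not react with the first unprocessed character.
def pvInv (lo up : Char) (p r : List Char) : Prop :=
  (∀ c ∈ p, ¬(c = lo ∨ c = up)) ∧
  List.IsChain (fun a b => pvOpp a b = false) p ∧
  (∀ x ∈ p.getLast?, ∀ c ∈ r.head?, pvOpp x c = false)

-- pushing a non-ignored, non-reacting character onto the stack
lemma pvReduce_push (lo up : Char) (q : List Char) (x : Char) (cs : List Char)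
    (hx : ¬(x = lo ∨ x = up)) (hb : ∀ y ∈ q.getLast?, pvOpp y x = false) :
    pvReduce lo up q.reverse (x :: cs) = pvReduce lo up (x :: q.reverse) cs := by
  rcases List.eq_nil_or_concat q with rfl | ⟨q', y, rfl⟩
  · simp [pvReduce, hx]
  · have hy : pvOpp y x = false := hb y (by simp)
    simp [pvReduce, hy, hx]

-- one-step unfolding of the fueled loop (definitional)
lemma pvLoopA_succ (ig : List Char) (n : Nat) (l : List Char) (cur : Nat) :
    pvLoopA ig (n + 1) l cur =
      if h : cur < l.length then
        if (l[cur]'h) ∈ ig then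
          pvLoopA ig n (l.eraseIdx cur) (cur - 1)
        else if _h2 : l.length - 1 ≤ cur then
          l
        else if pvOpp (l[cur]'h) (l[cur + 1]'(by omega)) then
          pvLoopA ig n (l.take cur ++ l.drop (cur + 2)) (cur - 1)
        else
          pvLoopA ig n l (cur + 1)
      else l := rfl

-- generic list facts used by the induction
lemma pvEraseIdx_mid (p : List Char) (c : Char) (cs : List Char) :
    (p ++ c :: cs).eraseIdx p.length = p ++ cs := by
  induction p with
  | nil => simp
  | cons a t ih => simpa using ih

lemma pvGet_mid (p : List Char) (c : Char) (cs : List Char) (h : p.length < (p ++ c :: cs).length) :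
    (p ++ c :: cs)[p.length]'h = c := by simp

lemma pvGet_mid1 (p : List Char) (c d : Char) (cs : List Char)
    (h : p.length + 1 < (p ++ c :: d :: cs).length) :
    (p ++ c :: d :: cs)[p.length + 1]'h = d := by
  simp [List.getElem_append_right (by omega : p.length ≤ p.length + 1)]

lemma pvChain_concat {R : Char → Char → Prop} (q : List Char) (x : Char)
    (h : List.IsChain R (q ++ [x])) : List.IsChain R q ∧ ∀ y ∈ q.getLast?, R y x := by
  rw [List.isChain_append] at h
  exact ⟨h.1, fun y hy => h.2.2 y hy x (by simp)⟩

-- after A's loop deletes at the cursor and steps back one, it agrees with the stack pass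
lemma pvStepBack (lo up : Char) (n : Nat)
    (ih : ∀ p r : List Char, p.length + 2 * r.length ≤ n → pvInv lo up p r →
      pvLoopA [lo, up] (n + 1) (p ++ r) p.length = pvReduce lo up p.reverse r)
    (p cs : List Char) (hm : p.length + 2 * cs.length + 1 ≤ n)
    (h1 : ∀ c ∈ p, ¬(c = lo ∨ c = up))
    (h2 : List.IsChain (fun a b => pvOpp a b = false) p) :
    pvLoopA [lo, up] (n + 1) (p ++ cs) (p.length - 1) = pvReduce lo up p.reverse cs := by
  rcases List.eq_nil_or_concat p with rfl | ⟨q, x, rfl⟩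
  · simpa using ih [] cs (by omega) ⟨by simp, by simp, by simp⟩
  · simp only [List.concat_eq_append] at h1 h2 hm ⊢
    obtain ⟨hq2, hqx⟩ := pvChain_concat q x h2
    have hx : ¬(x = lo ∨ x = up) := h1 x (by simp)
    have hq1 : ∀ c ∈ q, ¬(c = lo ∨ c = up) := fun c hc => h1 c (by simp [hc])
    have hih := ih q (x :: cs) (by simp at hm ⊢; omega)
      ⟨hq1, hq2, by simpa using hqx⟩
    rw [show (q ++ [x]).length - 1 = q.length by simp,
        show (q ++ [x]) ++ cs = q ++ (x :: cs) by simp,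
        hih, pvReduce_push lo up q x cs hx hqx]
    simp

lemma pvLoop_eq_reduce (lo up : Char) :
    ∀ n p r, p.length + 2 * r.length ≤ n → pvInv lo up p r →
      pvLoopA [lo, up] (n + 1) (p ++ r) p.length = pvReduce lo up p.reverse r := by
  intro n
  induction n with
  | zero =>
    intro p r hm _
    obtain ⟨rfl, rfl⟩ : p = [] ∧ r = [] := by
      constructor <;> (apply List.eq_nil_of_length_eq_zero; omega)
    rw [pvLoopA_succ]; simp [pvReduce]
  | succ n ih' =>
    have ih : ∀ p r : List Char, p.length + 2 * r.length ≤ n → pvInv lo up p r →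
        pvLoopA [lo, up] (n + 1) (p ++ r) p.length = pvReduce lo up p.reverse r := ih'
    intro p r hm hJ
    obtain ⟨hJ1, hJ2, hJ3⟩ := hJ
    cases r with
    | nil => rw [pvLoopA_succ]; simp [pvReduce]
    | cons c cs =>
      have hcur : p.length < (p ++ c :: cs).length := by simp
      by_cases hc : c = lo ∨ c = up
      · -- c is an ignored letter: A deletes it and steps back; B skips it
        rw [pvLoopA_succ, dif_pos hcur]
        rw [if_pos (by rw [pvGet_mid]; simpa using hc)]
        rw [pvEraseIdx_mid]
        rw [pvStepBack lo up n ih p cs (by simp at hm ⊢; omega) hJ1 hJ2]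
        -- B side: c skipped
        rcases List.eq_nil_or_concat p with rfl | ⟨q, x, rfl⟩
        · simp [pvReduce, hc]
        · have hxc : pvOpp x c = false := by
            have := hJ3 x (by simp) c (by simp); simpa using this
          simp [pvReduce, hxc, hc]
      · cases cs with
        | nil =>
          -- c is last and not ignored: A breaks and returns p ++ [c]; B pushes c
          rw [pvLoopA_succ, dif_pos hcur]
          rw [if_neg (by rw [pvGet_mid]; simpa using hc)]
          rw [dif_pos (by simp)]
          rw [pvReduce_push lo up p c [] hc (fun y hy => by
            have := hJ3 y hy c (by simp); simpa using this)]
          simp [pvReduce]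
        | cons d cs' =>
          have hpush : pvReduce lo up p.reverse (c :: d :: cs')
              = pvReduce lo up (c :: p.reverse) (d :: cs') :=
            pvReduce_push lo up p c (d :: cs') hc (fun y hy => by
              have := hJ3 y hy c (by simp); simpa using this)
          rw [pvLoopA_succ, dif_pos hcur]
          rw [if_neg (by rw [pvGet_mid]; simpa using hc)]
          rw [dif_neg (by simp)]
          rw [show ((p ++ c :: d :: cs')[p.length]'hcur) = c from pvGet_mid _ _ _ _]
          rw [pvGet_mid1]
          by_cases hop : pvOpp c d = true
          · -- reacting pair: A deletes both and steps back; B pushes c then pops it on d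
            rw [if_pos hop]
            rw [show (p ++ c :: d :: cs').take p.length ++ (p ++ c :: d :: cs').drop (p.length + 2)
                  = p ++ cs' by
              rw [List.take_left]
              rw [show p ++ c :: d :: cs' = (p ++ [c, d]) ++ cs' by simp]
              rw [show p.length + 2 = (p ++ [c, d]).length by simp]
              rw [List.drop_left]]
            rw [pvStepBack lo up n ih p cs' (by simp at hm ⊢; omega) hJ1 hJ2]
            rw [hpush]
            simp [pvReduce, hop]
          · -- no reaction: A advances the cursor; B pushes c
            rw [if_neg hop]
            have hih := ih (p ++ [c]) (d :: cs') (by simp at hm ⊢; omega)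
              ⟨by intro x hx; rcases (by simpa using hx : x ∈ p ∨ x = c) with h | rfl;
                  exacts [hJ1 x h, hc],
               by rw [List.isChain_append]
                  exact ⟨hJ2, by simp, fun a ha b hb => by
                    have := hJ3 a ha c (by simp)
                    simp at hb; subst hb; simpa using this⟩,
               by intro x hx cc hcc
                  simp at hx hcc; subst hx; subst hcc
                  simpa using hop⟩
            rw [show p ++ c :: d :: cs' = (p ++ [c]) ++ (d :: cs') by simp]
            rw [show p.length + 1 = (p ++ [c]).length by simp, hih, hpush]
            simp

-- ===== VERDICT (by name: the statement is the Claim_ definition above) =====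
theorem find_shortest_with_ignores_spec : Claim_equal_find_shortest_with_ignores := by
  intro polymer _
  unfold Spec_find_shortest_with_ignores find_shortest_with_ignores find_shortest_with_ignores_alt
  have h : ∀ lo up : Char, polymer_reduce polymer (String.ofList [lo, up])
      = String.ofList (pvReduce lo up [] polymer.toList) := by
    intro lo up
    unfold polymer_reduce
    congr 1
    have h0 : (String.ofList [lo, up]).toList = [lo, up] := Eq.symm (String.ofList_eq.mp rfl)
    have := pvLoop_eq_reduce lo up (2 * polymer.toList.length) [] polymer.toList
      (by simp) ⟨by simp, by simp, by simp⟩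
    rw [h0]
    simpa using this
  simp only [h]
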